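-- pv_equiv track=rewrite | github.com/BAD4R/VideoCreation | SCRIPTS/AudioScripts/Transcriber/transcribe.py | _mask_tags
-- ===== SOURCE A (Python) =====
-- from typing import List, Tuple, Dict, Any, Optional
--
-- _TAG_START = "["
--
-- _TAG_END = "]"
--
-- def _iter_tag_spans(text: str) -> List[Tuple[int, int]]:
--     """Return list of [start, end) spans for bracket tags like [tag].
--     If a tag is not closed, treat it as spanning to end of string.
--     """
--     spans: List[Tuple[int, int]] = []
--     if _TAG_START not in text:
--         return spans
--     i = 0
--     n = len(text)
--     while i < n:
--         start = text.find(_TAG_START, i)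
--         if start < 0:
--             break
--         end = text.find(_TAG_END, start + 1)
--         if end < 0:
--             spans.append((start, n))
--             break
--         spans.append((start, end + 1))
--         i = end + 1
--     return spans
--
-- def _mask_tags(text: str) -> str:
--     """Replace characters inside [tag] spans with a safe placeholder to
--     prevent punctuation/space based splitting inside tags.
--     """
--     if _TAG_START not in text:
--         return text
--     spans = _iter_tag_spans(text)
--     if not spans:
--         return text
--     chars = list(text)
--     for start, end in spans:
--         for i in range(start, end):
--             chars[i] = "a"
--     return "".join(chars)
-- ===== SOURCE B (Python) =====
-- def _mask_tags(text: str) -> str: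
--     out = []
--     inside = False
--     for ch in text:
--         if not inside and ch == "[":
--             inside = True
--             out.append("a")
--         elif inside:
--             out.append("a")
--             if ch == "]":
--                 inside = False
--         else:
--             out.append(ch)
--     return "".join(out)
-- ===== Notes on version B (the rewrite author's own statement) =====
-- stated objective: simpler
-- what changed: Replaced the two-pass design (find-based span collection, then in-place masking of each span range) by a single linear scan with a boolean state flag that emits the placeholder character for every position of a bracket span.
import Mathlib
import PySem

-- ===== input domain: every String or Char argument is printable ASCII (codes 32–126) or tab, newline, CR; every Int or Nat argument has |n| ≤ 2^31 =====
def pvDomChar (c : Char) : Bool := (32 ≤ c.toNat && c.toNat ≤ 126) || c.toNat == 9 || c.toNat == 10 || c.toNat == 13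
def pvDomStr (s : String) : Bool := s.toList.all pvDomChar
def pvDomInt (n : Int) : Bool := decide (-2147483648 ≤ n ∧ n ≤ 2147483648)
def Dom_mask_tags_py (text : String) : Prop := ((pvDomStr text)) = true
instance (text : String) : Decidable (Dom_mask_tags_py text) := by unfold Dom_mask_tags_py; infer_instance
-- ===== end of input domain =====

-- B replaces A's two passes (find-based span collection, then masking every span range in a
-- char array) by a single scan with a boolean state flag; same return value, not claimed faster.

-- ===== PORT A =====
-- the while-loop of _iter_tag_spans; Python's i strictly increases every iteration and the
-- loop stops once i ≥ len(text), so fuel = len(text)+1 is never exhausted.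
def pvIterLoop (cs : List Char) (fuel : Nat) (i : Int) : List (Int × Int) :=
  match fuel with
  | 0 => []
  | fuel' + 1 =>
    if i < (cs.length : Int) then
      let start := PySem.Chars.findFrom cs ['['] i none
      if start < 0 then []
      else
        let e := PySem.Chars.findFrom cs [']'] (start + 1) none
        if e < 0 then [(start, (cs.length : Int))]
        else (start, e + 1) :: pvIterLoop cs fuel' (e + 1)
    else []

def pvIterTagSpans (cs : List Char) : List (Int × Int) :=
  if PySem.Chars.isIn ['['] cs = false then []
  else pvIterLoop cs (cs.length + 1) 0

def mask_tags_py (text : String) : String :=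
  let cs := text.toList
  if PySem.Chars.isIn ['['] cs = false then text
  else
    let spans := pvIterTagSpans cs
    if spans = [] then text
    else
      String.ofList (spans.foldl
        (fun chars se =>
          (PySem.List.pyRange se.1 se.2 1).foldl
            (fun chars i => PySem.List.pySetD chars i 'a') chars) cs)

-- ===== PORT B =====
-- one pass over the characters; out is the appended char list, ''.join(out) = String.ofList
def mask_tags_py_alt (text : String) : String :=
  String.ofList (text.toList.foldl
    (fun (st : Bool × List Char) (ch : Char) =>
      if !st.1 && (ch == '[') then (true, st.2 ++ ['a'])
      else if st.1 then (decide (ch ≠ ']'), st.2 ++ ['a'])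
      else (st.1, st.2 ++ [ch])) (false, [])).2

-- ===== PRECONDITION & SPEC =====
def Spec_mask_tags_py (text : String) (out : String) : Prop := out = mask_tags_py_alt text
instance (text : String) (out : String) : Decidable (Spec_mask_tags_py text out) := by unfold Spec_mask_tags_py; infer_instance

-- ===== CLAIM (what is proved, stated in full; the proofs are below) =====
def Claim_equal_mask_tags_py : Prop := ∀ (text : String), Dom_mask_tags_py text → Spec_mask_tags_py text (mask_tags_py text)

-- ===== LEMMAS AND PROOFS =====

-- the pure state machine B's fold computes
def pvMach : Bool → List Char → List Char
  | _, [] => []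
  | inside, c :: rest =>
    if !inside && (c == '[') then 'a' :: pvMach true rest
    else if inside then 'a' :: pvMach (decide (c ≠ ']')) rest
    else c :: pvMach inside rest

def pvMachState : Bool → List Char → Bool
  | b, [] => b
  | inside, c :: rest =>
    if !inside && (c == '[') then pvMachState true rest
    else if inside then pvMachState (decide (c ≠ ']')) rest
    else pvMachState inside rest

lemma pvFold_eq_mach (cs : List Char) (b : Bool) (acc : List Char) :
    cs.foldl (fun (st : Bool × List Char) (ch : Char) =>
      if !st.1 && (ch == '[') then (true, st.2 ++ ['a'])
      else if st.1 then (decide (ch ≠ ']'), st.2 ++ ['a'])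
      else (st.1, st.2 ++ [ch])) (b, acc)
    = (pvMachState b cs, acc ++ pvMach b cs) := by
  induction cs generalizing b acc with
  | nil => simp [pvMach, pvMachState]
  | cons c rest ih =>
    rw [List.foldl_cons]
    by_cases h1 : (!b && (c == '[')) = true
    · rw [show (if !b && (c == '[') then (true, acc ++ ['a'])
        else if b then (decide (c ≠ ']'), acc ++ ['a'])
        else (b, acc ++ [c])) = (true, acc ++ ['a']) from if_pos h1, ih]
      simp [pvMach, pvMachState, h1]
    · by_cases h2 : b
      · rw [show (if !b && (c == '[') then (true, acc ++ ['a'])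
          else if b then (decide (c ≠ ']'), acc ++ ['a'])
          else (b, acc ++ [c])) = (decide (c ≠ ']'), acc ++ ['a']) by
            rw [if_neg (by simp_all), if_pos h2], ih]
        simp [pvMach, pvMachState, h2]
      · rw [show (if !b && (c == '[') then (true, acc ++ ['a'])
          else if b then (decide (c ≠ ']'), acc ++ ['a'])
          else (b, acc ++ [c])) = (b, acc ++ [c]) by
            rw [if_neg (by simp_all), if_neg h2], ih]
        have hc : ¬ c = '[' := by simp_all
        simp [pvMach, pvMachState, h2, hc]

lemma pvMach_no_open (l : List Char) (h : '[' ∉ l) : pvMach false l = l := by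
  induction l with
  | nil => rfl
  | cons c rest ih =>
    simp only [List.mem_cons, not_or] at h
    simp [pvMach, beq_iff_eq, Ne.symm h.1, ih h.2]

lemma pvMach_no_close (l : List Char) (h : ']' ∉ l) :
    pvMach true l = List.replicate l.length 'a' := by
  induction l with
  | nil => rfl
  | cons c rest ih =>
    simp only [List.mem_cons, not_or] at h
    have : (decide (c ≠ ']')) = true := by simp [Ne.symm h.1]
    simp [pvMach, this, ih h.2, List.replicate_succ]

lemma pvMach_false_append (t u : List Char) (h : '[' ∉ t) :
    pvMach false (t ++ u) = t ++ pvMach false u := by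
  induction t with
  | nil => rfl
  | cons c rest ih =>
    simp only [List.mem_cons, not_or] at h
    simp [pvMach, beq_iff_eq, Ne.symm h.1, ih h.2]

lemma pvMach_true_append (t u : List Char) (h : ']' ∉ t) :
    pvMach true (t ++ ']' :: u) = List.replicate (t.length + 1) 'a' ++ pvMach false u := by
  induction t with
  | nil => simp [pvMach]
  | cons c rest ih =>
    simp only [List.mem_cons, not_or] at h
    have : (decide (c ≠ ']')) = true := by simp [Ne.symm h.1]
    simp only [List.cons_append, pvMach, this]
    simp [ih h.2, List.replicate_succ]

-- single-character find: -1 exactly when the char is absent, else index of its first occurrence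
lemma pvFind_char_neg (l : List Char) (c : Char) (h : c ∉ l) :
    PySem.Chars.find l [c] = -1 := by
  rw [PySem.Chars.find_eq_neg_one_iff]
  intro hinf
  exact h (hinf.subset (by simp))

lemma pvFind_char_pos (l : List Char) (c : Char) (h : c ∈ l) :
    ∃ t u, l = t ++ c :: u ∧ c ∉ t ∧ PySem.Chars.find l [c] = (t.length : Int) := by
  have hinf : [c] <:+: l := by
    obtain ⟨s, t, rfl⟩ := List.append_of_mem h
    exact ⟨s, t, by simp⟩
  have hnn : 0 ≤ PySem.Chars.find l [c] := (PySem.Chars.find_nonneg_iff l [c]).mpr hinf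
  obtain ⟨hpre, hmin⟩ := PySem.Chars.find_spec hnn
  set p := (PySem.Chars.find l [c]).toNat with hp
  obtain ⟨u, hu⟩ := hpre
  have hplen : p < l.length := by
    by_contra hge
    have : l.drop p = [] := List.drop_eq_nil_of_le (by omega)
    rw [this] at hu; simp at hu
  refine ⟨l.take p, u, ?_, ?_, ?_⟩
  · conv_lhs => rw [← List.take_append_drop p l]
    rw [← hu]; simp
  · intro hc
    obtain ⟨i, hi, hieq⟩ := List.mem_iff_getElem.mp hc
    have hi' : i < p := by simpa [Nat.min_eq_left hplen.le] using hi
    have : [c] <+: l.drop i := by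
      rw [List.drop_eq_getElem_cons (by omega)]
      refine ⟨l.drop (i+1), ?_⟩
      have hg : l[i] = c := by
        calc l[i] = (List.take p l)[i] := (List.getElem_take (h := hi)).symm
          _ = c := hieq
      simp [hg]
    exact hmin i hi' this
  · rw [List.length_take, Nat.min_eq_left hplen.le, hp, Int.toNat_of_nonneg hnn]

lemma take_set_succ (l : List Char) (a : Nat) (c : Char) (h : a < l.length) :
    (l.set a c).take (a+1) = l.take a ++ [c] := by
  rw [List.set_eq_take_append_cons_drop, if_pos h, List.take_append]
  simp [Nat.min_eq_left h.le]

-- masking the range [a, a+k) of the char array, as A's inner foldl does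
lemma pvMaskRange (k : Nat) : ∀ (cs : List Char) (a : Nat), a + k ≤ cs.length →
    (PySem.List.pyRange (a : Int) ((a : Int) + (k : Int)) 1).foldl
      (fun chars i => PySem.List.pySetD chars i 'a') cs
    = cs.take a ++ List.replicate k 'a' ++ cs.drop (a + k) := by
  induction k with
  | zero =>
    intro cs a _
    simp [PySem.List.pyRange, List.take_append_drop]
  | succ k ih =>
    intro cs a hle
    have hab : (a : Int) < (a : Int) + ((k : Int) + 1) := by omega
    rw [show ((a : Int) + ((k:Nat)+1 : Nat)) = (a : Int) + ((k : Int) + 1) by push_cast; ring]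
    rw [PySem.List.pyRange_one_cons hab, List.foldl_cons, PySem.List.pySetD_natCast]
    have hrw : (a : Int) + ((k : Int) + 1) = ((a+1 : Nat) : Int) + (k : Int) := by push_cast; ring
    rw [hrw]
    have ha : a < cs.length := by omega
    rw [show ((a:Int) + 1) = ((a+1 : Nat) : Int) by push_cast; ring,
      ih (cs.set a 'a') (a+1) (by simp; omega)]
    rw [take_set_succ cs a 'a' ha, List.drop_set_of_lt (by omega : a < a + 1 + k)]
    rw [show a + 1 + k = a + (k+1) by omega]
    simp [List.replicate_succ]

lemma pvDrop_congr (cs cs₀ : List Char) (k m : Nat) (hd : cs₀.drop k = cs.drop k)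
    (hm : k ≤ m) : cs₀.drop m = cs.drop m := by
  rw [show m = k + (m - k) by omega, ← List.drop_drop, ← List.drop_drop, hd]

-- main loop invariant: applying the spans found from position k masks exactly what the
-- machine, restarted in state False at position k, masks; cs₀ is the partially masked
-- array (it agrees with cs, on which the spans were computed, from position k on).
lemma pvMain (fuel : Nat) : ∀ (cs cs₀ : List Char) (k : Nat),
    cs₀.length = cs.length → cs₀.drop k = cs.drop k → k ≤ cs.length →
    cs.length + 1 ≤ fuel + k →
    (pvIterLoop cs fuel (k : Int)).foldl
      (fun chars se =>
        (PySem.List.pyRange se.1 se.2 1).foldl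
          (fun chars i => PySem.List.pySetD chars i 'a') chars) cs₀
    = cs₀.take k ++ pvMach false (cs₀.drop k) := by
  induction fuel with
  | zero => intro cs cs₀ k _ _ hk hfuel; omega
  | succ fuel ih =>
    intro cs cs₀ k hlen hdrop hk hfuel
    by_cases hkl : k < cs.length
    case neg =>
      have hke : k = cs.length := by omega
      simp only [pvIterLoop]
      rw [if_neg (by exact_mod_cast Nat.not_lt.mpr (Nat.le_of_eq hke.symm))]
      rw [List.foldl_nil, hdrop, hke, List.drop_eq_nil_of_le le_rfl]
      have h1 : cs₀.length ≤ cs.length := by omega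
      simp [pvMach, List.take_of_length_le h1]
    case pos =>
      simp only [pvIterLoop]
      rw [if_pos (by exact_mod_cast hkl)]
      rw [PySem.Chars.findFrom_natCast cs ['['] k hk]
      by_cases hf : PySem.Chars.find (cs.drop k) ['['] = -1
      · rw [if_pos hf, if_pos (by norm_num)]
        have hno : '[' ∉ cs.drop k := by
          intro hmem
          obtain ⟨t, u, _, _, hfind⟩ := pvFind_char_pos _ '[' hmem
          rw [hfind] at hf; omega
        rw [List.foldl_nil, hdrop, pvMach_no_open _ hno, ← hdrop, List.take_append_drop]
      · have hmem : '[' ∈ cs.drop k := by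
          by_contra hnm; exact hf (pvFind_char_neg _ _ hnm)
        obtain ⟨t, u, hsplit, hnt, hfind⟩ := pvFind_char_pos _ '[' hmem
        rw [if_neg hf, hfind]
        rw [if_neg (by omega : ¬ ((k : Int) + (t.length : Int) < 0))]
        have hlen2 : cs.length = k + t.length + 1 + u.length := by
          have := congrArg List.length hsplit
          simp [List.length_drop] at this; omega
        have hcast1 : (k : Int) + (t.length : Int) + 1 = ((k + t.length + 1 : Nat) : Int) := by
          push_cast; ring
        rw [hcast1, PySem.Chars.findFrom_natCast cs [']'] (k + t.length + 1) (by omega)]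
        have hdropS : cs.drop (k + t.length + 1) = u := by
          rw [show k + t.length + 1 = k + (t.length + 1) by ring, ← List.drop_drop, hsplit,
            show t ++ '[' :: u = (t ++ ['[']) ++ u by simp,
            show t.length + 1 = (t ++ ['[']).length by simp]
          exact List.drop_left
        rw [hdropS]
        have hdrop₀ : cs₀.drop k = t ++ '[' :: u := hdrop.trans hsplit
        have htake₀ : cs₀.take (k + t.length) = cs₀.take k ++ t := by
          rw [List.take_add, hdrop₀, List.take_left]
        by_cases hfu : PySem.Chars.find u [']'] = -1
        · -- unclosed tag: single span to the end of the string
          rw [if_pos hfu, if_pos (by norm_num)]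
          rw [List.foldl_cons, List.foldl_nil]
          have hcast2 : ((cs.length : Nat) : Int) =
              ((k + t.length : Nat) : Int) + ((u.length + 1 : Nat) : Int) := by
            push_cast; omega
          rw [show (k : Int) + (t.length : Int) = ((k + t.length : Nat) : Int) by push_cast; ring,
            hcast2, pvMaskRange (u.length + 1) cs₀ (k + t.length) (by omega)]
          have hnu : ']' ∉ u := by
            intro hmem2
            obtain ⟨t2, u2, _, _, hfind2⟩ := pvFind_char_pos _ ']' hmem2
            rw [hfind2] at hfu; omega
          rw [hdrop₀, pvMach_false_append t ('[' :: u) hnt]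
          have : pvMach false ('[' :: u) = 'a' :: pvMach true u := by simp [pvMach]
          rw [this, pvMach_no_close u hnu, htake₀,
            List.drop_eq_nil_of_le (by omega : cs₀.length ≤ k + t.length + (u.length + 1))]
          simp [List.replicate_succ]
        · -- closed tag: record the span and continue after the ']'
          have hmem2 : ']' ∈ u := by
            by_contra hnm; exact hfu (pvFind_char_neg _ _ hnm)
          obtain ⟨t2, u2, hsplit2, hnt2, hfind2⟩ := pvFind_char_pos _ ']' hmem2
          rw [if_neg hfu, hfind2]
          rw [if_neg (by omega : ¬ (((k + t.length + 1 : Nat) : Int) + (t2.length : Int) < 0))]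
          rw [List.foldl_cons]
          have hulen : u.length = t2.length + 1 + u2.length := by
            have := congrArg List.length hsplit2; simp at this; omega
          -- the masked prefix after applying this span
          have hcast3 : ((k + t.length + 1 : Nat) : Int) + (t2.length : Int) + 1 =
              ((k + t.length : Nat) : Int) + ((t2.length + 2 : Nat) : Int) := by push_cast; ring
          rw [show (k : Int) + (t.length : Int) = ((k + t.length : Nat) : Int) by push_cast; ring,
            hcast3, pvMaskRange (t2.length + 2) cs₀ (k + t.length) (by omega)]
          set q1 : Nat := k + t.length + (t2.length + 2) with hq1
          set chars₁ : List Char :=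
            cs₀.take (k + t.length) ++ List.replicate (t2.length + 2) 'a' ++ cs₀.drop q1
            with hchars₁
          have hdropq1 : cs₀.drop q1 = cs.drop q1 := pvDrop_congr cs cs₀ k q1 hdrop (by omega)
          have hlen₁ : chars₁.length = cs.length := by
            simp [hchars₁, List.length_take, List.length_drop, hlen]
            omega
          have hpreflen : (cs₀.take (k + t.length) ++ List.replicate (t2.length + 2) 'a').length = q1 := by
            simp [List.length_take, hlen]; omega
          have hgen : ∀ (X C : List Char), X.length = q1 → (X ++ C).drop q1 = C := by
            intro X C hX; rw [← hX]; exact List.drop_left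
          have hgen2 : ∀ (X C : List Char), X.length = q1 → (X ++ C).take q1 = X := by
            intro X C hX; rw [← hX]; exact List.take_left
          have hdrop₁ : chars₁.drop q1 = cs.drop q1 := by
            rw [hchars₁]; exact (hgen _ _ hpreflen).trans hdropq1
          -- apply the induction hypothesis from position q1
          have hcast4 : ((k + t.length : Nat) : Int) + ((t2.length + 2 : Nat) : Int) =
              ((q1 : Nat) : Int) := by push_cast; omega
          rw [hcast4, ih cs chars₁ q1 hlen₁ hdrop₁ (by omega) (by omega)]
          -- compute both sides
          have htakeq1 : chars₁.take q1 =
              cs₀.take (k + t.length) ++ List.replicate (t2.length + 2) 'a' := by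
            rw [hchars₁]; exact hgen2 _ _ hpreflen
          have hdropu2 : cs.drop q1 = u2 := by
            have : cs.drop q1 = (cs.drop (k + t.length + 1)).drop (t2.length + 1) := by
              rw [List.drop_drop]; congr 1; omega
            rw [this, hdropS, hsplit2,
              show t2 ++ ']' :: u2 = (t2 ++ [']']) ++ u2 by simp,
              show t2.length + 1 = (t2 ++ [']']).length by simp]
            exact List.drop_left
          rw [htakeq1, hdrop₁, hdropu2]
          -- right-hand side
          rw [hdrop₀, hsplit2, pvMach_false_append t ('[' :: (t2 ++ ']' :: u2)) hnt]
          have : pvMach false ('[' :: (t2 ++ ']' :: u2)) = 'a' :: pvMach true (t2 ++ ']' :: u2) := by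
            simp [pvMach]
          rw [this, pvMach_true_append t2 u2 hnt2, htake₀]
          simp [List.replicate_succ]

-- ===== VERDICT (by name: the statement is the Claim_ definition above) =====
theorem mask_tags_py_spec : Claim_equal_mask_tags_py := by
  intro text _
  unfold Spec_mask_tags_py mask_tags_py mask_tags_py_alt
  rw [pvFold_eq_mach]
  have hB : (pvMachState false text.toList, ([] : List Char) ++ pvMach false text.toList).2
      = pvMach false text.toList := by simp
  rw [hB]
  by_cases hin : PySem.Chars.isIn ['['] text.toList = false
  · rw [if_pos hin]
    have hno : '[' ∉ text.toList := by
      intro hmem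
      obtain ⟨s, t, hx⟩ := List.append_of_mem hmem
      have : PySem.Chars.isIn ['['] text.toList = true :=
        (PySem.Chars.isIn_iff_infix _ _).mpr ⟨s, t, by rw [hx]; simp⟩
      simp_all
    rw [pvMach_no_open _ hno]
    exact String.ofList_toList.symm
  · rw [if_neg hin]
    unfold pvIterTagSpans
    rw [if_neg hin]
    have hmain := pvMain (text.toList.length + 1) text.toList text.toList 0 rfl rfl
      (by omega) (by omega)
    simp only [Nat.cast_zero, List.take_zero, List.drop_zero, List.nil_append] at hmain
    by_cases hsp : pvIterLoop text.toList (text.toList.length + 1) 0 = []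
    · rw [if_pos hsp]
      rw [hsp, List.foldl_nil] at hmain
      rw [← hmain]
      exact String.ofList_toList.symm
    · rw [if_neg hsp, hmain]
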